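-- pv_equiv track=rewrite | github.com/Moon-Gitub/demonew | migracion/productos/migrar_productos.py | extraer_filas_insert
-- ===== SOURCE A (Python) =====
-- def extraer_filas_insert(contenido):
--     """Extrae cada fila ( ... ) del INSERT, respetando strings con paréntesis."""
--     filas = []
--     i = 0
--     n = len(contenido)
--     while i < n:
--         i = contenido.find("(", i)
--         if i < 0:
--             break
--         depth = 0
--         j = i
--         in_string = False
--         escape = False
--         while j < n:
--             c = contenido[j]
--             if escape:
--                 escape = False
--                 j += 1
--                 continue
--             if c == "\\" and in_string:
--                 escape = True
--                 j += 1
--                 continue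
--             if in_string:
--                 if c == "'" and (j + 1 >= n or contenido[j + 1] != "'"):
--                     in_string = False
--                 elif c == "'" and j + 1 < n and contenido[j + 1] == "'":
--                     j += 1
--                 j += 1
--                 continue
--             if c == "'":
--                 in_string = True
--                 j += 1
--                 continue
--             if c == "(":
--                 depth += 1
--                 j += 1
--                 continue
--             if c == ")":
--                 depth -= 1
--                 if depth == 0:
--                     filas.append(contenido[i + 1 : j])
--                     break
--                 j += 1
--                 continue
--             j += 1
--         i = j + 1 if j < n else n
--     return filas
-- ===== SOURCE B (Python) =====
-- def _cadena(s, j):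
--     """Index just past the single-quoted string whose opening quote is at j-1.
--     Handles backslash escapes and doubled '' quotes."""
--     n = len(s)
--     while j < n:
--         c = s[j]
--         if c == "\\":
--             j += 2
--         elif c == "'":
--             if j + 1 < n and s[j + 1] == "'":
--                 j += 2
--             else:
--                 return j + 1
--         else:
--             j += 1
--     return j
--
--
-- def _grupo(s, j):
--     """Index of the ')' matching the '(' at j-1, or None if unterminated.
--     Nested groups are parsed by recursion; strings are skipped by _cadena."""
--     n = len(s)
--     while j < n:
--         c = s[j]
--         if c == "'":
--             j = _cadena(s, j + 1)
--         elif c == "(":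
--             fin = _grupo(s, j + 1)
--             if fin is None:
--                 return None
--             j = fin + 1
--         elif c == ")":
--             return j
--         else:
--             j += 1
--     return None
--
--
-- def extraer_filas_insert(contenido):
--     """Extrae cada fila ( ... ) del INSERT, respetando strings con parentesis.
--     Recursive-descent parser instead of a flat depth/in_string state machine."""
--     filas = []
--     pos = contenido.find("(")
--     while pos != -1:
--         fin = _grupo(contenido, pos + 1)
--         if fin is None:
--             break
--         filas.append(contenido[pos + 1:fin])
--         pos = contenido.find("(", fin + 1)
--     return filas
-- ===== Notes on version B (the rewrite author's own statement) =====
-- stated objective: alternative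
-- what changed: A is a flat state machine maintaining an integer depth and in_string/escape flags restarted via str.find; B is a recursive-descent parser: nesting is handled by recursion of _grupo on the grammar (no depth counter) and quoted strings are consumed by a dedicated scanner _cadena (no in_string/escape flags).
import Mathlib
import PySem

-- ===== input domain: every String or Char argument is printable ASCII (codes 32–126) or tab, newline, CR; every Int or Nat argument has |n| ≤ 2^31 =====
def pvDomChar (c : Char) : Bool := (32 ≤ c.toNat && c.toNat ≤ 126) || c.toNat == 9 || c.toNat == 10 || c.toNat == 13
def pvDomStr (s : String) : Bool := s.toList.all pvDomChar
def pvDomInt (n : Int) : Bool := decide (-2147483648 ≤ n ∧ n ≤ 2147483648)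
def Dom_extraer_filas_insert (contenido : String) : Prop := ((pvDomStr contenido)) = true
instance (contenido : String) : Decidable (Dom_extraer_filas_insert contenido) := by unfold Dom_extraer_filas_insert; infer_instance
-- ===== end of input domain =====

-- B replaces A's flat depth/in_string/escape state machine by a recursive-descent
-- parser (recursion for nesting, a dedicated string scanner); same output, same O(n)
-- cost (objective: alternative).


-- ===== PORT A =====

-- contenido.find("(", i) for a single-char needle: first index ≥ i holding the char, none = -1
def pvFindParen (cs : List Char) (i : Nat) : Option Nat :=
  if h : i < cs.length then
    if cs[i] = '(' then some i else pvFindParen cs (i + 1)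
  else none
termination_by cs.length - i
decreasing_by exact Nat.sub_lt_sub_left h (Nat.lt_succ_self i)

-- A's inner `while j < n` loop; `some j` = the break (closing paren at j), `none` = ran off the end
def pvInnerA (cs : List Char) (j : Nat) (depth : Int) (instr esc : Bool) : Option Nat :=
  if h : j < cs.length then
    let c := cs[j]
    if esc then pvInnerA cs (j + 1) depth instr false
    else if c = '\\' ∧ instr then pvInnerA cs (j + 1) depth instr true
    else if instr then
      if c = '\'' ∧ (¬ j + 1 < cs.length ∨ cs[j + 1]? ≠ some '\'') then
        pvInnerA cs (j + 1) depth false esc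
      else if c = '\'' ∧ j + 1 < cs.length ∧ cs[j + 1]? = some '\'' then
        pvInnerA cs (j + 2) depth instr esc
      else pvInnerA cs (j + 1) depth instr esc
    else if c = '\'' then pvInnerA cs (j + 1) depth true esc
    else if c = '(' then pvInnerA cs (j + 1) (depth + 1) instr esc
    else if c = ')' then
      if depth - 1 = 0 then some j
      else pvInnerA cs (j + 1) (depth - 1) instr esc
    else pvInnerA cs (j + 1) depth instr esc
  else none
termination_by cs.length - j
decreasing_by all_goals
  exact Nat.sub_lt_sub_left h
    (by first | exact Nat.lt_succ_self _ | exact Nat.lt_succ_of_lt (Nat.lt_succ_self _))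

-- A's outer `while i < n` loop (i = contenido.find("(", i); run inner; i = j+1 or n).
-- fuel = n+1 is exact: i strictly increases each iteration, so at most n+1 entries of the loop.
def pvOuterA (cs : List Char) (fuel : Nat) (i : Nat) (acc : List (List Char)) : List (List Char) :=
  match fuel with
  | 0 => acc
  | fuel + 1 =>
    if i < cs.length then
      match pvFindParen cs i with
      | none => acc
      | some f =>
        match pvInnerA cs f 0 false false with
        | some k => pvOuterA cs fuel (k + 1) (acc ++ [PySem.List.slice cs (some ((f : Int) + 1)) (some (k : Int))])
        | none => acc
    else acc

def extraer_filas_insert (contenido : String) : List String :=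
  (pvOuterA contenido.toList (contenido.toList.length + 1) 0 []).map String.ofList

-- ===== PORT B =====

-- B's _cadena: index just past the quoted string opened before index j
def pvCadenaB (cs : List Char) (j : Nat) : Nat :=
  if h : j < cs.length then
    if cs[j] = '\\' then pvCadenaB cs (j + 2)
    else if cs[j] = '\'' then
      if cs[j + 1]? = some '\'' then pvCadenaB cs (j + 2) else j + 1
    else pvCadenaB cs (j + 1)
  else j
termination_by cs.length - j
decreasing_by all_goals
  exact Nat.sub_lt_sub_left h
    (by first | exact Nat.lt_succ_self _ | exact Nat.lt_succ_of_lt (Nat.lt_succ_self _))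

-- B's _grupo: index of the ')' matching the '(' opened before index j, none if unterminated.
-- The while loop and the recursive nested-group call both become recursion; fuel makes it
-- total (j strictly increases on every call, so fuel = n+1 from a start j ≥ 0 is enough).
def pvGrupoB (cs : List Char) (fuel : Nat) (j : Nat) : Option Nat :=
  match fuel with
  | 0 => none
  | fuel + 1 =>
    if h : j < cs.length then
      if cs[j] = '\'' then pvGrupoB cs fuel (pvCadenaB cs (j + 1))
      else if cs[j] = '(' then
        match pvGrupoB cs fuel (j + 1) with
        | none => none
        | some m => pvGrupoB cs fuel (m + 1)
      else if cs[j] = ')' then some j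
      else pvGrupoB cs fuel (j + 1)
    else none

-- B's top-level while loop over str.find results
def pvOuterB (cs : List Char) (fuel : Nat) (pos? : Option Nat) (acc : List (List Char)) : List (List Char) :=
  match fuel with
  | 0 => acc
  | fuel + 1 =>
    match pos? with
    | none => acc
    | some p =>
      match pvGrupoB cs (cs.length + 1) (p + 1) with
      | none => acc
      | some k => pvOuterB cs fuel (pvFindParen cs (k + 1)) (acc ++ [PySem.List.slice cs (some ((p : Int) + 1)) (some (k : Int))])

def extraer_filas_insert_alt (contenido : String) : List String :=
  (pvOuterB contenido.toList (contenido.toList.length + 1) (pvFindParen contenido.toList 0) []).map String.ofList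

-- ===== PRECONDITION & SPEC =====
def Spec_extraer_filas_insert (contenido : String) (out : List String) : Prop := out = extraer_filas_insert_alt contenido
instance (contenido : String) (out : List String) : Decidable (Spec_extraer_filas_insert contenido out) := by unfold Spec_extraer_filas_insert; infer_instance

-- ===== CLAIM (what is proved, stated in full; the proofs are below) =====
def Claim_equal_extraer_filas_insert : Prop := ∀ (contenido : String), Dom_extraer_filas_insert contenido → Spec_extraer_filas_insert contenido (extraer_filas_insert contenido)

-- ===== LEMMAS AND PROOFS =====

-- one-step unfolding lemmas for A's inner state machine
theorem A_none (cs : List Char) (j : Nat) (d : Int) (i e : Bool) (h : ¬ j < cs.length) :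
    pvInnerA cs j d i e = none := by
  rw [pvInnerA]; simp [h]

theorem A_esc (cs : List Char) (j : Nat) (d : Int) (i : Bool) (h : j < cs.length) :
    pvInnerA cs j d i true = pvInnerA cs (j + 1) d i false := by
  conv_lhs => rw [pvInnerA]
  simp [h]

theorem A_bs (cs : List Char) (j : Nat) (d : Int) (h : j < cs.length) (hb : cs[j] = '\\') :
    pvInnerA cs j d true false = pvInnerA cs (j + 1) d true true := by
  conv_lhs => rw [pvInnerA]
  simp [h, hb]

theorem A_str_close (cs : List Char) (j : Nat) (d : Int) (h : j < cs.length)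
    (hq : cs[j] = '\'') (hd : cs[j + 1]? ≠ some '\'') :
    pvInnerA cs j d true false = pvInnerA cs (j + 1) d false false := by
  conv_lhs => rw [pvInnerA]
  simp [h, hq, hd]

theorem A_str_dbl (cs : List Char) (j : Nat) (d : Int) (h : j < cs.length)
    (hq : cs[j] = '\'') (hd : cs[j + 1]? = some '\'') :
    pvInnerA cs j d true false = pvInnerA cs (j + 2) d true false := by
  have h1 : j + 1 < cs.length := by
    by_contra hc
    rw [List.getElem?_eq_none (by omega : cs.length ≤ j + 1)] at hd; simp at hd
  have hg : cs[j + 1] = '\'' := by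
    rw [List.getElem?_eq_getElem h1] at hd; exact Option.some.inj hd
  conv_lhs => rw [pvInnerA]
  simp [h, hq, h1, hg]

theorem A_str_other (cs : List Char) (j : Nat) (d : Int) (h : j < cs.length)
    (hb : ¬ cs[j] = '\\') (hq : ¬ cs[j] = '\'') :
    pvInnerA cs j d true false = pvInnerA cs (j + 1) d true false := by
  conv_lhs => rw [pvInnerA]
  simp [h, hb, hq]

theorem A_quote (cs : List Char) (j : Nat) (d : Int) (h : j < cs.length) (hq : cs[j] = '\'') :
    pvInnerA cs j d false false = pvInnerA cs (j + 1) d true false := by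
  conv_lhs => rw [pvInnerA]
  simp [h, hq]

theorem A_open (cs : List Char) (j : Nat) (d : Int) (h : j < cs.length) (ho : cs[j] = '(') :
    pvInnerA cs j d false false = pvInnerA cs (j + 1) (d + 1) false false := by
  conv_lhs => rw [pvInnerA]
  simp [h, ho]

theorem A_close (cs : List Char) (j : Nat) (d : Int) (h : j < cs.length) (hc : cs[j] = ')') :
    pvInnerA cs j d false false = if d - 1 = 0 then some j else pvInnerA cs (j + 1) (d - 1) false false := by
  conv_lhs => rw [pvInnerA]
  simp [h, hc]

theorem A_other (cs : List Char) (j : Nat) (d : Int) (h : j < cs.length)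
    (hq : ¬ cs[j] = '\'') (ho : ¬ cs[j] = '(') (hc : ¬ cs[j] = ')') :
    pvInnerA cs j d false false = pvInnerA cs (j + 1) d false false := by
  conv_lhs => rw [pvInnerA]
  simp [h, hq, ho, hc]

theorem pvCadenaB_ge (cs : List Char) (j : Nat) : j ≤ pvCadenaB cs j := by
  fun_induction pvCadenaB cs j <;> omega

theorem pvGrupoB_ge (cs : List Char) : ∀ (fuel j k : Nat), pvGrupoB cs fuel j = some k → j ≤ k := by
  intro fuel
  induction fuel with
  | zero => intro j k hk; simp [pvGrupoB] at hk
  | succ fuel ih =>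
    intro j k hk
    rw [pvGrupoB] at hk
    by_cases hj : j < cs.length
    · simp only [hj, dite_true] at hk
      by_cases hq : cs[j] = '\''
      · rw [if_pos hq] at hk
        have := ih _ _ hk
        have := pvCadenaB_ge cs (j + 1)
        omega
      · rw [if_neg hq] at hk
        by_cases ho : cs[j] = '('
        · rw [if_pos ho] at hk
          cases hg : pvGrupoB cs fuel (j + 1) with
          | none => rw [hg] at hk; simp at hk
          | some m =>
            rw [hg] at hk
            simp only at hk
            have h1 := ih _ _ hg
            have h2 := ih _ _ hk
            omega
        · rw [if_neg ho] at hk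
          by_cases hc : cs[j] = ')'
          · rw [if_pos hc] at hk; simp at hk; omega
          · rw [if_neg hc] at hk
            have := ih _ _ hk
            omega
    · simp [hj] at hk

theorem pvFindParen_spec (cs : List Char) (i : Nat) :
    ∀ f, pvFindParen cs i = some f → i ≤ f ∧ f < cs.length ∧ cs[f]? = some '(' := by
  fun_induction pvFindParen cs i <;> intro f hf
  · rename_i h ho
    simp at hf; subst hf
    exact ⟨le_refl _, h, by simp [List.getElem?_eq_getElem h, ho]⟩
  · rename_i ih
    have := ih f hf
    exact ⟨by omega, this.2.1, this.2.2⟩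
  · simp at hf

-- inside a string (escape clear) A's machine lands exactly where B's _cadena lands
theorem inner_string (cs : List Char) (j : Nat) (depth : Int) :
    pvInnerA cs j depth true false = pvInnerA cs (pvCadenaB cs j) depth false false := by
  fun_induction pvCadenaB cs j with
  | case1 j h hb ih =>
    rw [A_bs cs j depth h hb, ← ih]
    by_cases h1 : j + 1 < cs.length
    · rw [A_esc cs (j + 1) depth true h1]
    · rw [A_none cs (j + 1) depth true true h1,
        A_none cs (j + 2) depth true false (by omega)]
  | case2 j h hb hq hd ih =>
    rw [A_str_dbl cs j depth h hq hd, ih]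
  | case3 j h hb hq hd =>
    rw [A_str_close cs j depth h hq hd]
  | case4 j h hb hq ih =>
    rw [A_str_other cs j depth h hb hq, ih]
  | case5 j h =>
    rw [A_none cs j depth true false h, A_none cs j depth false false h]

-- at depth d ≥ 1 (clean string state) A's machine equals B's recursive-descent _grupo:
-- it breaks at the ')' _grupo returns (when d = 1) or continues past it at depth d - 1
theorem inner_grupo (cs : List Char) :
    ∀ m j (depth : Int) fuel, cs.length - j ≤ m → cs.length - j < fuel → 1 ≤ depth →
      pvInnerA cs j depth false false =
        match pvGrupoB cs fuel j with
        | none => none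
        | some k => if depth = 1 then some k else pvInnerA cs (k + 1) (depth - 1) false false := by
  intro m
  induction m with
  | zero =>
    intro j depth fuel hm hf hd
    have hj : ¬ j < cs.length := by omega
    obtain ⟨fuel, rfl⟩ : ∃ f, fuel = f + 1 := ⟨fuel - 1, by omega⟩
    rw [pvGrupoB, A_none cs j depth false false hj]
    simp [hj]
  | succ m ih =>
    intro j depth fuel hm hf hd
    obtain ⟨fuel, rfl⟩ : ∃ f, fuel = f + 1 := ⟨fuel - 1, by omega⟩
    by_cases hj : j < cs.length
    · rw [pvGrupoB]
      simp only [hj, dite_true]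
      by_cases hq : cs[j] = '\''
      · -- enter a string: A sets instr, B calls _cadena
        have hcad := pvCadenaB_ge cs (j + 1)
        rw [if_pos hq, A_quote cs j depth hj hq, inner_string,
          ih (pvCadenaB cs (j + 1)) depth fuel (by omega) (by omega) hd]
      · rw [if_neg hq]
        by_cases ho : cs[j] = '('
        · -- nested group: A raises depth, B recurses
          rw [if_pos ho, A_open cs j depth hj ho,
            ih (j + 1) (depth + 1) fuel (by omega) (by omega) (by omega)]
          cases hg : pvGrupoB cs fuel (j + 1) with
          | none => simp
          | some k =>
            have hk := pvGrupoB_ge cs fuel (j + 1) k hg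
            simp only [show ¬ depth + 1 = 1 by omega, if_false,
              show depth + 1 - 1 = depth by omega]
            exact ih (k + 1) depth fuel (by omega) (by omega) hd
        · rw [if_neg ho]
          by_cases hc : cs[j] = ')'
          · rw [if_pos hc, A_close cs j depth hj hc]
            by_cases h1 : depth = 1
            · simp [h1]
            · simp only [h1, if_false, show ¬ depth - 1 = 0 by omega]
          · rw [if_neg hc, A_other cs j depth hj hq ho hc,
              ih (j + 1) depth fuel (by omega) (by omega) hd]
    · rw [pvGrupoB, A_none cs j depth false false hj]
      simp [hj]

theorem pvOuterB_none (cs : List Char) (fuel : Nat) (acc : List (List Char)) :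
    pvOuterB cs fuel none acc = acc := by
  cases fuel <;> rfl

-- the outer loops coincide: A restarts find+inner from i, B iterates over find results
theorem outer_eq (cs : List Char) :
    ∀ m i fuelA fuelB acc, cs.length - i ≤ m → cs.length - i < fuelA → cs.length - i < fuelB →
      pvOuterA cs fuelA i acc = pvOuterB cs fuelB (pvFindParen cs i) acc := by
  intro m
  induction m with
  | zero =>
    intro i fuelA fuelB acc hm hfa hfb
    have hi : ¬ i < cs.length := by omega
    have hnone : pvFindParen cs i = none := by rw [pvFindParen]; simp [hi]
    obtain ⟨fuelA, rfl⟩ : ∃ f, fuelA = f + 1 := ⟨fuelA - 1, by omega⟩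
    rw [pvOuterA, hnone, pvOuterB_none]
    simp [hi]
  | succ m ih =>
    intro i fuelA fuelB acc hm hfa hfb
    obtain ⟨fuelA, rfl⟩ : ∃ f, fuelA = f + 1 := ⟨fuelA - 1, by omega⟩
    obtain ⟨fuelB, rfl⟩ : ∃ f, fuelB = f + 1 := ⟨fuelB - 1, by omega⟩
    by_cases hi : i < cs.length
    · rw [pvOuterA]
      simp only [hi, if_true]
      cases hfind : pvFindParen cs i with
      | none => rw [pvOuterB_none]
      | some f =>
        obtain ⟨hif, hfn, hfo⟩ := pvFindParen_spec cs i f hfind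
        have hfo' : cs[f] = '(' := by
          rw [List.getElem?_eq_getElem hfn] at hfo; exact Option.some.inj hfo
        rw [pvOuterB]
        simp only
        -- A's inner starts at the '(' itself: its first step raises depth to 1
        rw [A_open cs f 0 hfn hfo',
          inner_grupo cs (cs.length - (f + 1)) (f + 1) (0 + 1) (cs.length + 1)
            (le_refl _) (by omega) (by omega)]
        cases hg : pvGrupoB cs (cs.length + 1) (f + 1) with
        | none => simp
        | some k =>
          have hk := pvGrupoB_ge cs (cs.length + 1) (f + 1) k hg
          exact ih (k + 1) fuelA fuelB _ (by omega) (by omega) (by omega)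
    · have hnone : pvFindParen cs i = none := by rw [pvFindParen]; simp [hi]
      rw [pvOuterA, hnone, pvOuterB_none]
      simp [hi]

-- ===== VERDICT (by name: the statement is the Claim_ definition above) =====
theorem extraer_filas_insert_spec : Claim_equal_extraer_filas_insert := by
  intro contenido _
  unfold Spec_extraer_filas_insert extraer_filas_insert extraer_filas_insert_alt
  rw [outer_eq contenido.toList contenido.toList.length 0
      (contenido.toList.length + 1) (contenido.toList.length + 1) [] (by omega) (by omega) (by omega)]
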